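-- pv_equiv track=rewrite | github.com/pdrago97/ruedatatest | main.py | determine_secret_code
-- ===== SOURCE A (Python) =====
-- from typing import List
-- from collections import defaultdict
--
-- def determine_secret_code(lines: List[str]) -> str:
--     # Create a graph where each node points to all nodes that can follow it
--     graph = defaultdict(list)
--     for line in lines:
--         for i in range(len(line) - 1):
--             if line[i+1] not in graph[line[i]]:
--                 graph[line[i]].append(line[i+1])
--
--     # Find all nodes that have no incoming edges
--     start_nodes = set(graph.keys())
--     for edges in graph.values():
--         start_nodes -= set(edges)
--
--     # There should be exactly one start node
--     assert len(start_nodes) == 1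
--     start_node = start_nodes.pop()
--
--     # Perform a depth-first search to find the shortest path that visits all nodes
--     path = []
--     stack = [(start_node, [start_node])]
--     while stack:
--         node, path = stack.pop()
--         for next_node in graph[node]:
--             if next_node not in path:
--                 stack.append((next_node, path + [next_node]))
--     return ''.join(path)
-- ===== SOURCE B (Python) =====
-- from typing import List
--
-- def determine_secret_code(lines: List[str]) -> str:
--     # Build the successor map (insertion order, deduplicated), one pass over adjacent pairs.
--     graph = {}
--     for line in lines:
--         for a, b in zip(line, line[1:]):
--             succ = graph.setdefault(a, [])
--             if b not in succ:
--                 succ.append(b)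
--
--     # The start symbol is the only key that never occurs as a successor.
--     starts = [k for k in graph if all(k not in v for v in graph.values())]
--     assert len(starts) == 1
--
--     # Greedy walk: repeatedly follow the first successor not already on the path.
--     path = [starts[0]]
--     node = starts[0]
--     while True:
--         nxt = next((n for n in graph.get(node, []) if n not in path), None)
--         if nxt is None:
--             break
--         path.append(nxt)
--         node = nxt
--     return ''.join(path)
-- ===== Notes on version B (the rewrite author's own statement) =====
-- stated objective: simpler
-- what changed: A's stack-based DFS that pushes extended copies of partial paths and returns the last path popped is replaced by a single greedy walk that starts at the start node and repeatedly appends the first successor not already on the path; the graph is built from zip(line, line[1:]) pairs with setdefault instead of an index loop over a defaultdict, and the start node is found by filtering the keys instead of iterated set subtraction.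
import Mathlib
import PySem

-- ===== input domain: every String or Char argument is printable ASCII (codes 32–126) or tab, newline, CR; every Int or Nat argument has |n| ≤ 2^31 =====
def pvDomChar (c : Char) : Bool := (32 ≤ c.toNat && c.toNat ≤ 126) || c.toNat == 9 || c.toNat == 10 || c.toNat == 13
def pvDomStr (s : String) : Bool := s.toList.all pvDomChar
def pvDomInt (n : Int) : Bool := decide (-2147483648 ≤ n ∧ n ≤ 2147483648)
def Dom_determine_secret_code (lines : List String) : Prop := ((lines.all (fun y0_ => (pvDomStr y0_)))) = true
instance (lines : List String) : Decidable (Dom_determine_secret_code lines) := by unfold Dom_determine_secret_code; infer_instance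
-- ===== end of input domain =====

-- B replaces A's stack-based DFS (whose returned path is the last one popped) by a single greedy
-- walk that always follows the first not-yet-visited successor: simpler, and no stack of partial paths.

-- ===== PORT A =====

-- graph = defaultdict(list); for line: for i in range(len(line)-1): if line[i+1] not in graph[line[i]]: graph[line[i]].append(line[i+1])
-- (the defaultdict access graph[line[i]] materialises the key; 'modify' is exactly access-then-conditional-append)
def pvGraphA (lines : List String) : PySem.Dict Char (List Char) :=
  lines.foldl (fun g line =>
    (PySem.List.pyRange 0 (PySem.Str.len line - 1) 1).foldl (fun g i =>
      match PySem.Str.pyGet? line i, PySem.Str.pyGet? line (i + 1) with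
      | some a, some b => g.modify a [] (fun cur => if cur.contains b then cur else cur ++ [b])
      | _, _ => g) g) PySem.Dict.empty

-- start_nodes = set(graph.keys()); for edges in graph.values(): start_nodes -= set(edges)
def pvStartsA (g : PySem.Dict Char (List Char)) : PySem.Set Char :=
  g.values.foldl (fun s edges => PySem.Set.diff s (PySem.Set.ofList edges)) (PySem.Set.ofList g.keys)

-- termination measure machinery for A's while-loop over the stack (Python's loop always terminates:
-- every pushed path gains a new character drawn from the finite multiset of graph values)
def pvMissing (g : PySem.Dict Char (List Char)) (p : List Char) : Nat :=
  ((g.values.flatten).filter (fun c => !(p.contains c))).length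

def pvMeasure (g : PySem.Dict Char (List Char)) (stack : List (Char × List Char)) : Nat :=
  (stack.map (fun e => (g.values.flatten.length + 1) ^ (pvMissing g e.2 + 1))).sum

theorem pvMem_flatten_values (g : PySem.Dict Char (List Char)) (a b : Char)
    (h : b ∈ g.getD a []) : b ∈ g.values.flatten := by
  rw [PySem.Dict.getD_eq_get?_getD] at h
  cases hg : g.get? a with
  | none => rw [hg] at h; simp at h
  | some v =>
    rw [hg] at h; simp at h
    have hv : (a, v) ∈ g.items := PySem.Dict.mem_items_of_get?_eq_some g hg
    exact List.mem_flatten.mpr ⟨v, by simp only [PySem.Dict.values]; exact List.mem_map_of_mem hv, h⟩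

theorem pvMissing_lt (g : PySem.Dict Char (List Char)) (p : List Char) (n : Char)
    (hn : n ∈ g.values.flatten) (hp : p.contains n = false) :
    pvMissing g (p ++ [n]) < pvMissing g p := by
  unfold pvMissing
  have hpred : (fun c => !((p ++ [n]).contains c)) = fun c => !(c == n) && !(p.contains c) := by
    funext c
    by_cases hc : c = n <;> simp [hc]
  rw [hpred, ← List.filter_filter]
  apply List.length_filter_lt_length_iff_exists.mpr
  refine ⟨n, List.mem_filter.mpr ⟨hn, ?_⟩, by simp⟩
  simp [List.contains_eq_mem] at hp; simp [hp]

theorem pvMeasure_dec (g : PySem.Dict Char (List Char)) (node : Char) (p : List Char)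
    (rest : List (Char × List Char)) :
    pvMeasure g (((((g.getD node []).filter (fun n => !(p.contains n))).map
        (fun n => (n, p ++ [n]))).reverse) ++ rest) < pvMeasure g ((node, p) :: rest) := by
  unfold pvMeasure
  rw [List.map_append, List.sum_append, List.map_cons, List.sum_cons, List.map_reverse,
    List.sum_reverse, List.map_map]
  have hone : 1 ≤ (g.values.flatten.length + 1) ^ (pvMissing g p) := Nat.one_le_pow _ _ (by omega)
  have heach : ∀ x ∈ ((g.getD node []).filter (fun n => !(p.contains n))).map
      ((fun e => (g.values.flatten.length + 1) ^ (pvMissing g e.2 + 1)) ∘ (fun n => (n, p ++ [n]))),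
      x ≤ (g.values.flatten.length + 1) ^ (pvMissing g p) := by
    intro x hx
    obtain ⟨n, hn, rfl⟩ := List.mem_map.mp hx
    obtain ⟨hmem, hnp⟩ := List.mem_filter.mp hn
    have h1 : pvMissing g (p ++ [n]) < pvMissing g p :=
      pvMissing_lt g p n (pvMem_flatten_values g node n hmem) (by simpa using hnp)
    show (g.values.flatten.length + 1) ^ (pvMissing g (p ++ [n]) + 1) ≤ _
    exact Nat.pow_le_pow_right (by omega) (by omega)
  have hsum := List.sum_le_card_nsmul _ _ heach
  rw [List.length_map] at hsum
  have hlen : ((g.getD node []).filter (fun n => !(p.contains n))).length ≤ g.values.flatten.length := by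
    have h1 : ((g.getD node []).filter (fun n => !(p.contains n))).length ≤ (g.getD node []).length :=
      List.length_filter_le _ _
    have h2 : g.getD node [] = [] ∨ g.getD node [] ∈ g.values := by
      rw [PySem.Dict.getD_eq_get?_getD]
      cases hg : g.get? node with
      | none => left; rfl
      | some v =>
        right
        have hv := PySem.Dict.mem_items_of_get?_eq_some g hg
        simp only [PySem.Dict.values]; exact List.mem_map_of_mem hv
    rcases h2 with h2 | h2
    · simp [h2]
    · have := (List.sublist_flatten_of_mem h2).length_le
      omega
  rw [pow_succ]
  set X := (g.values.flatten.length + 1) ^ (pvMissing g p) with hX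
  simp only [smul_eq_mul] at hsum
  nlinarith [hsum, hlen, hone]

-- while stack: node, path = stack.pop(); for next_node in graph[node]: if next_node not in path: stack.append(...)
-- stack represented top-first (Python's list end = our head); return the last popped path
def pvLoopA (g : PySem.Dict Char (List Char)) (stack : List (Char × List Char))
    (path : List Char) : List Char :=
  match stack with
  | [] => path
  | (node, p) :: rest =>
      pvLoopA g ((((g.getD node []).filter (fun n => !(p.contains n))).map
        (fun n => (n, p ++ [n]))).reverse ++ rest) p
termination_by pvMeasure g stack
decreasing_by exact pvMeasure_dec g node p rest

def determine_secret_code (lines : List String) : String :=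
  let graph := pvGraphA lines
  let start_nodes := pvStartsA graph
  match start_nodes with
  | [] => ""    -- AssertionError: excluded by Pre_
  | [start] =>  -- assert len(start_nodes) == 1; start_node = start_nodes.pop()
      PySem.Str.join "" ((pvLoopA graph [(start, [start])] []).map (fun c => String.ofList [c]))
  | _ :: _ :: _ => ""     -- AssertionError: excluded by Pre_

-- ===== PORT B =====

-- B-side termination machinery (a separate copy of A's measure, so that neither port's definition closure reaches the other's)
def pvMissingB (g : PySem.Dict Char (List Char)) (p : List Char) : Nat :=
  ((g.values.flatten).filter (fun c => !(p.contains c))).length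

theorem pvMemB_flatten_values (g : PySem.Dict Char (List Char)) (a b : Char)
    (h : b ∈ g.getD a []) : b ∈ g.values.flatten := by
  rw [PySem.Dict.getD_eq_get?_getD] at h
  cases hg : g.get? a with
  | none => rw [hg] at h; simp at h
  | some v =>
    rw [hg] at h; simp at h
    have hv : (a, v) ∈ g.items := PySem.Dict.mem_items_of_get?_eq_some g hg
    exact List.mem_flatten.mpr ⟨v, by simp only [PySem.Dict.values]; exact List.mem_map_of_mem hv, h⟩

theorem pvMissingB_lt (g : PySem.Dict Char (List Char)) (p : List Char) (n : Char)
    (hn : n ∈ g.values.flatten) (hp : p.contains n = false) :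
    pvMissingB g (p ++ [n]) < pvMissingB g p := by
  unfold pvMissingB
  have hpred : (fun c => !((p ++ [n]).contains c)) = fun c => !(c == n) && !(p.contains c) := by
    funext c
    by_cases hc : c = n <;> simp [hc]
  rw [hpred, ← List.filter_filter]
  apply List.length_filter_lt_length_iff_exists.mpr
  refine ⟨n, List.mem_filter.mpr ⟨hn, ?_⟩, by simp⟩
  simp [List.contains_eq_mem] at hp; simp [hp]

-- graph = {}; for line: for a, b in zip(line, line[1:]): succ = graph.setdefault(a, []); if b not in succ: succ.append(b)
def pvGraphB (lines : List String) : PySem.Dict Char (List Char) :=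
  lines.foldl (fun g line =>
    (line.toList.zip line.toList.tail).foldl (fun g ab =>
      g.insert ab.1
        (if (g.getD ab.1 []).contains ab.2 then g.getD ab.1 [] else g.getD ab.1 [] ++ [ab.2])) g)
    PySem.Dict.empty

-- path = [start]; node = start; repeatedly follow the first successor not already on the path
def pvWalkB (g : PySem.Dict Char (List Char)) (path : List Char) (node : Char) : List Char :=
  match h : (g.getD node []).find? (fun n => !(path.contains n)) with
  | none => path
  | some n => pvWalkB g (path ++ [n]) n
termination_by pvMissingB g path
decreasing_by
  exact pvMissingB_lt g path n (pvMemB_flatten_values g node n (List.mem_of_find?_eq_some h))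
    (by have := List.find?_some h; simpa using this)

def determine_secret_code_alt (lines : List String) : String :=
  let graph := pvGraphB lines
  let starts := graph.keys.filter (fun k => graph.values.all (fun v => !(v.contains k)))
  match starts with
  | [start] =>  -- assert len(starts) == 1
      PySem.Str.join "" ((pvWalkB graph [start] start).map (fun c => String.ofList [c]))
  | _ => ""

-- ===== PRECONDITION & SPEC =====
-- Pre_ excludes exactly the inputs on which A's 'assert len(start_nodes) == 1' raises AssertionError:
-- there must be exactly one character that occurs in some non-final position but never in a non-initial one.
def Pre_determine_secret_code (lines : List String) : Prop :=
  ((PySem.List.dedup (lines.flatMap (fun l => l.toList.dropLast))).filter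
    (fun c => !((lines.flatMap (fun l => l.toList.tail)).contains c))).length = 1
instance (lines : List String) : Decidable (Pre_determine_secret_code lines) := by
  unfold Pre_determine_secret_code; infer_instance

def pvWitness_determine_secret_code : List String := ["abc", "bcd"]

def Spec_determine_secret_code (lines : List String) (out : String) : Prop := out = determine_secret_code_alt lines
instance (lines : List String) (out : String) : Decidable (Spec_determine_secret_code lines out) := by unfold Spec_determine_secret_code; infer_instance

-- ===== CLAIM (what is proved, stated in full; the proofs are below) =====
def Claim_equal_determine_secret_code : Prop := ∀ (lines : List String), Dom_determine_secret_code lines → Pre_determine_secret_code lines → Spec_determine_secret_code lines (determine_secret_code lines)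

-- ===== LEMMAS AND PROOFS =====


-- B's dict step (setdefault + conditional append), the common building block of both graph builds
def pvOp (d : PySem.Dict Char (List Char)) (ab : Char × Char) : PySem.Dict Char (List Char) :=
  d.insert ab.1 (if (d.getD ab.1 []).contains ab.2 then d.getD ab.1 [] else d.getD ab.1 [] ++ [ab.2])

def pvPairs (lines : List String) : List (Char × Char) :=
  lines.flatMap (fun s => s.toList.zip s.toList.tail)

-- the greedy walk seen from any stack: A's loop returns the walk from the BOTTOM stack entry
theorem pvLoop_eq_walk (g : PySem.Dict Char (List Char)) (stack : List (Char × List Char))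
    (path : List Char) :
    pvLoopA g stack path = (match stack.getLast? with
      | none => path
      | some e => pvWalkB g e.2 e.1) := by
  induction stack, path using pvLoopA.induct g with
  | case1 path => simp [pvLoopA]
  | case2 path node p rest ih =>
    rw [pvLoopA, ih]
    rcases rest with _ | ⟨r, rs⟩
    · rw [List.append_nil]
      cases hn : (g.getD node []).filter (fun n => !(p.contains n)) with
      | nil =>
        have hf : (g.getD node []).find? (fun n => !(p.contains n)) = none := by
          rw [← List.head?_filter, hn]; rfl
        have hw : pvWalkB g p node = p := by
          rw [pvWalkB.eq_def]
          split
          next => rfl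
          next m h => rw [hf] at h; cases h
        simp only [List.map_nil, List.reverse_nil, List.getLast?_nil, List.getLast?_singleton]
        rw [hw]
      | cons n ns =>
        have hf : (g.getD node []).find? (fun n => !(p.contains n)) = some n := by
          rw [← List.head?_filter, hn]; rfl
        have hw : pvWalkB g p node = pvWalkB g (p ++ [n]) n := by
          rw [pvWalkB.eq_def]
          split
          next h => rw [hf] at h; cases h
          next m h => rw [hf] at h; cases h; rfl
        rw [List.getLast?_reverse, List.map_cons, List.head?_cons, List.getLast?_singleton]
        show pvWalkB g (p ++ [n]) n = pvWalkB g p node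
        exact hw.symm
    · rw [List.getLast?_append_of_ne_nil _ (by simp : (r :: rs) ≠ []),
        List.getLast?_cons_cons]
      rcases hx : (r :: rs).getLast? with _ | e
      · simp at hx
      · rfl

-- per-line: A's index loop over range(len-1) is the fold over adjacent pairs
theorem pvFoldl_flatMap {α β γ : Type} (l : List α) (f : α → List β) (op : γ → β → γ)
    (init : γ) : (l.flatMap f).foldl op init
      = l.foldl (fun acc x => (f x).foldl op acc) init := by
  induction l generalizing init with
  | nil => rfl
  | cons x t ih => simp [List.foldl_append, ih]

theorem pvContains_ofList (v : List Char) (x : Char) :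
    (PySem.Set.ofList v).contains x = v.contains x := by
  by_cases hx : x ∈ v <;> simp_all [PySem.Set.mem_ofList]

theorem pvDedup_append (l : List Char) (b : Char) :
    PySem.List.dedup (l ++ [b]) = PySem.Set.add (PySem.List.dedup l) b := by
  simp [PySem.List.dedup_eq_ofList, PySem.Set.ofList_eq_foldl, List.foldl_append]

theorem pvH1 (l : List Char) (g : PySem.Dict Char (List Char)) :
    (List.range (l.length - 1)).foldl (fun g k =>
      match l[k]?, l[k + 1]? with
      | some a, some b => pvOp g (a, b)
      | _, _ => g) g = (l.zip l.tail).foldl pvOp g := by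
  induction l generalizing g with
  | nil => rfl
  | cons a t ih =>
    cases t with
    | nil => rfl
    | cons b t' =>
      rw [show (a :: b :: t').length - 1 = (t'.length + 1) from by simp]
      rw [List.range_succ_eq_map, List.foldl_cons, List.foldl_map]
      show (List.range t'.length).foldl _ (pvOp g (a, b)) = _
      rw [show (a :: b :: t').tail = b :: t' from rfl, List.zip_cons_cons, List.foldl_cons]
      have hstep : (fun (g : PySem.Dict Char (List Char)) (k : Nat) =>
          match (a :: b :: t')[Nat.succ k]?, (a :: b :: t')[Nat.succ k + 1]? with
          | some a, some b => pvOp g (a, b)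
          | _, _ => g) = (fun g k =>
          match (b :: t')[k]?, (b :: t')[k + 1]? with
          | some a, some b => pvOp g (a, b)
          | _, _ => g) := by
        funext g k
        simp only [Nat.succ_eq_add_one, List.getElem?_cons_succ]
      rw [show (b :: t').tail = t' from rfl] at ih
      rw [hstep, show t'.length = (b :: t').length - 1 from by simp]
      exact ih (pvOp g (a, b))

theorem pvRange_foldl_eq_pairs (line : String) (g : PySem.Dict Char (List Char)) :
    (PySem.List.pyRange 0 (PySem.Str.len line - 1) 1).foldl (fun g i =>
      match PySem.Str.pyGet? line i, PySem.Str.pyGet? line (i + 1) with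
      | some a, some b => g.modify a [] (fun cur => if cur.contains b then cur else cur ++ [b])
      | _, _ => g) g = (line.toList.zip line.toList.tail).foldl pvOp g := by
  cases hL : line.toList with
  | nil =>
    rw [PySem.Str.len_eq, hL]
    rw [show ((([] : List Char).length : Int) - 1) = -1 from by simp]
    rw [PySem.List.pyRange_one_eq_nil (by omega)]
    rfl
  | cons c0 t0 =>
    rw [PySem.Str.len_eq, hL]
    rw [show (((c0 :: t0).length : Int) - 1) = ((t0.length : Nat) : Int) from by simp]
    rw [PySem.List.pyRange_zero_natCast, List.foldl_map]
    have hcongr : ∀ (acc : PySem.Dict Char (List Char)), ∀ k ∈ List.range t0.length,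
        (match PySem.Str.pyGet? line ((k : Nat) : Int), PySem.Str.pyGet? line (((k : Nat) : Int) + 1) with
          | some a, some b => acc.modify a [] (fun cur => if cur.contains b then cur else cur ++ [b])
          | _, _ => acc)
        = (match (c0 :: t0)[k]?, (c0 :: t0)[k + 1]? with
          | some a, some b => pvOp acc (a, b)
          | _, _ => acc) := by
      intro acc k _
      have h1 : PySem.Str.pyGet? line ((k : Nat) : Int) = (c0 :: t0)[k]? := by
        show PySem.List.pyGet? line.toList _ = _
        rw [hL, PySem.List.pyGet?_natCast]
      have h2 : PySem.Str.pyGet? line (((k : Nat) : Int) + 1) = (c0 :: t0)[k + 1]? := by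
        show PySem.List.pyGet? line.toList _ = _
        rw [hL, show (((k : Nat) : Int) + 1) = (((k + 1 : Nat) : Nat) : Int) from by push_cast; ring,
          PySem.List.pyGet?_natCast]
      rw [h1, h2]
      cases (c0 :: t0)[k]? <;> cases (c0 :: t0)[k + 1]? <;> rfl
    rw [PySem.List.foldl_congr_mem _ _ _ _ hcongr]
    rw [show t0.length = (c0 :: t0).length - 1 from by simp]
    exact pvH1 (c0 :: t0) g

theorem pvGraphA_eq (lines : List String) : pvGraphA lines = (pvPairs lines).foldl pvOp PySem.Dict.empty := by
  unfold pvGraphA pvPairs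
  rw [pvFoldl_flatMap]
  exact PySem.List.foldl_congr_mem _ _ _ _ (fun acc line _ => pvRange_foldl_eq_pairs line acc)

theorem pvGraphB_eq (lines : List String) : pvGraphB lines = (pvPairs lines).foldl pvOp PySem.Dict.empty := by
  unfold pvGraphB pvPairs
  rw [pvFoldl_flatMap]
  rfl

theorem pvKeys_build (P : List (Char × Char)) :
    (P.foldl pvOp PySem.Dict.empty).keys = PySem.List.dedup (P.map (·.1)) := by
  show (List.foldl (fun d ab => d.insert ab.1
    (if (d.getD ab.1 []).contains ab.2 then d.getD ab.1 [] else d.getD ab.1 [] ++ [ab.2]))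
      PySem.Dict.empty P).keys = _
  rw [PySem.Dict.keys_foldl_insert_key P Prod.fst
    (fun d ab => if (d.getD ab.1 []).contains ab.2 then d.getD ab.1 [] else d.getD ab.1 [] ++ [ab.2])
    PySem.Dict.empty]
  rw [show (PySem.Dict.empty : PySem.Dict Char (List Char)).keys = [] from rfl,
    PySem.Set.update_nil_left, PySem.List.dedup_eq_ofList]

theorem pvNodupKeys_build (P : List (Char × Char)) :
    (P.foldl pvOp PySem.Dict.empty).keys.Nodup := by
  show (List.foldl (fun d ab => d.insert ab.1
    (if (d.getD ab.1 []).contains ab.2 then d.getD ab.1 [] else d.getD ab.1 [] ++ [ab.2]))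
      PySem.Dict.empty P).keys.Nodup
  exact PySem.Dict.nodup_keys_foldl_insert_key P Prod.fst _ PySem.Dict.empty
    (by rw [show (PySem.Dict.empty : PySem.Dict Char (List Char)).keys = [] from rfl]; exact List.nodup_nil)

theorem pvGetD_build (P : List (Char × Char)) (a : Char) :
    (P.foldl pvOp PySem.Dict.empty).getD a []
      = PySem.List.dedup ((P.filter (fun q => q.1 == a)).map (·.2)) := by
  induction P using List.reverseRecOn with
  | nil => rfl
  | append_singleton P q ih =>
    rw [List.foldl_append, List.foldl_cons, List.foldl_nil]
    show (PySem.Dict.insert _ q.1 _).getD a [] = _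
    rw [PySem.Dict.getD_insert, List.filter_append, List.map_append]
    by_cases hq : a = q.1
    · subst hq
      rw [if_pos rfl, show List.filter (fun q' => q'.1 == q.1) [q] = [q] from by simp,
        List.map_cons, List.map_nil, pvDedup_append, ← ih]
      rfl
    · rw [if_neg hq, show List.filter (fun q' => q'.1 == a) [q] = [] from by
        simp [Ne.symm hq], List.map_nil, List.append_nil]
      exact ih

theorem pvMemGetD_build (P : List (Char × Char)) (a b : Char) :
    b ∈ (P.foldl pvOp PySem.Dict.empty).getD a [] ↔ (a, b) ∈ P := by
  rw [pvGetD_build, PySem.List.mem_dedup]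
  constructor
  · intro h
    obtain ⟨q, hq, rfl⟩ := List.mem_map.mp h
    obtain ⟨hqP, hqa⟩ := List.mem_filter.mp hq
    have : q.1 = a := by simpa using hqa
    rw [show (a, q.2) = q from by rw [← this]] 
    exact hqP
  · intro h
    exact List.mem_map.mpr ⟨(a, b), List.mem_filter.mpr ⟨h, by simp⟩, rfl⟩

theorem pvMemValues_build (P : List (Char × Char)) (b : Char) :
    b ∈ (P.foldl pvOp PySem.Dict.empty).values.flatten ↔ b ∈ P.map (·.2) := by
  rw [PySem.Dict.values_eq_map_keys _ (pvNodupKeys_build P) []]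
  constructor
  · intro h
    obtain ⟨v, hv, hbv⟩ := List.mem_flatten.mp h
    obtain ⟨k, _, rfl⟩ := List.mem_map.mp hv
    have := (pvMemGetD_build P k b).mp hbv
    exact List.mem_map.mpr ⟨(k, b), this, rfl⟩
  · intro h
    obtain ⟨q, hq, rfl⟩ := List.mem_map.mp h
    refine List.mem_flatten.mpr ⟨(P.foldl pvOp PySem.Dict.empty).getD q.1 [], ?_, ?_⟩
    · refine List.mem_map.mpr ⟨q.1, ?_, rfl⟩
      rw [pvKeys_build, PySem.List.mem_dedup]
      exact List.mem_map.mpr ⟨q, hq, rfl⟩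
    · exact (pvMemGetD_build P q.1 q.2).mpr (by simpa using hq)

theorem pvDiff_foldl (vs : List (List Char)) (s : List Char) :
    vs.foldl (fun s e => PySem.Set.diff s (PySem.Set.ofList e)) s
      = s.filter (fun k => vs.all (fun v => !(v.contains k))) := by
  induction vs generalizing s with
  | nil => simp
  | cons v vs ih =>
    rw [List.foldl_cons, ih]
    have hdiff : PySem.Set.diff s (PySem.Set.ofList v) = s.filter (fun x => !(v.contains x)) := by
      show s.filter (fun x => !((PySem.Set.ofList v).contains x)) = _
      simp only [pvContains_ofList]
    rw [hdiff, List.filter_filter]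
    apply List.filter_congr
    intro k _
    simp only [List.all_cons, Bool.and_comm]

theorem pvMapFst_pairs (l : List Char) : (l.zip l.tail).map Prod.fst = l.dropLast := by
  induction l with
  | nil => rfl
  | cons a t ih =>
    cases t with
    | nil => rfl
    | cons b t' => simpa using ih

theorem pvMapSnd_pairs (l : List Char) : (l.zip l.tail).map Prod.snd = l.tail := by
  induction l with
  | nil => rfl
  | cons a t ih =>
    cases t with
    | nil => rfl
    | cons b t' => simpa using ih

-- A's start set and B's start list are the same list, and Pre_ says it is a singleton
theorem pvStarts_eq (lines : List String) :
    pvStartsA (pvGraphA lines)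
      = (pvGraphB lines).keys.filter (fun k => (pvGraphB lines).values.all (fun v => !(v.contains k))) := by
  unfold pvStartsA
  rw [pvGraphA_eq, ← pvGraphB_eq, pvDiff_foldl,
    PySem.Set.ofList_eq_self_of_nodup _ (by rw [pvGraphB_eq]; exact pvNodupKeys_build _)]

theorem pvStarts_pre (lines : List String) :
    (pvGraphB lines).keys.filter (fun k => (pvGraphB lines).values.all (fun v => !(v.contains k)))
      = (PySem.List.dedup (lines.flatMap (fun l => l.toList.dropLast))).filter
          (fun c => !((lines.flatMap (fun l => l.toList.tail)).contains c)) := by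
  have hfst : (pvPairs lines).map Prod.fst = lines.flatMap (fun l => l.toList.dropLast) := by
    unfold pvPairs
    rw [List.map_flatMap]
    simp only [pvMapFst_pairs]
  have hsnd : (pvPairs lines).map Prod.snd = lines.flatMap (fun l => l.toList.tail) := by
    unfold pvPairs
    rw [List.map_flatMap]
    simp only [pvMapSnd_pairs]
  rw [pvGraphB_eq, pvKeys_build, show (fun q : Char × Char => q.1) = Prod.fst from rfl, hfst]
  apply List.filter_congr
  intro k _
  have hval := pvMemValues_build (pvPairs lines) k
  rw [show (fun q : Char × Char => q.2) = Prod.snd from rfl, hsnd] at hval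
  by_cases hk2 : k ∈ lines.flatMap (fun l => l.toList.tail)
  · obtain ⟨v, hv, hkv⟩ := List.mem_flatten.mp (hval.mpr hk2)
    have h1 : ((pvPairs lines).foldl pvOp PySem.Dict.empty).values.all (fun v => !(v.contains k)) = false := by
      rw [List.all_eq_false]
      exact ⟨v, hv, by simp [List.contains_iff_mem, hkv]⟩
    rw [h1, show ((lines.flatMap (fun l => l.toList.tail)).contains k) = true from by
      simp [List.contains_iff_mem, hk2]]
    rfl
  · have h1 : ((pvPairs lines).foldl pvOp PySem.Dict.empty).values.all (fun v => !(v.contains k)) = true := by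
      rw [List.all_eq_true]
      intro v hv
      simp only [Bool.not_eq_true', ← Bool.not_eq_true, List.contains_iff_mem]
      intro hkv
      exact hk2 (hval.mp (List.mem_flatten.mpr ⟨v, hv, hkv⟩))
    rw [h1, show ((lines.flatMap (fun l => l.toList.tail)).contains k) = false from by
      simp [List.contains_iff_mem, hk2]]
    rfl

-- ===== VERDICT (by name: the statement is the Claim_ definition above) =====
theorem determine_secret_code_spec : Claim_equal_determine_secret_code := by
  intro lines _ hpre
  unfold Spec_determine_secret_code determine_secret_code determine_secret_code_alt
  dsimp only
  have hg : pvGraphA lines = pvGraphB lines := by rw [pvGraphA_eq, pvGraphB_eq]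
  have hs := pvStarts_eq lines
  have hlen : ((pvGraphB lines).keys.filter
      (fun k => (pvGraphB lines).values.all (fun v => !(v.contains k)))).length = 1 := by
    rw [pvStarts_pre]; exact hpre
  obtain ⟨s, hsing⟩ := List.length_eq_one_iff.mp hlen
  rw [hs, hsing, hg]
  show PySem.Str.join "" _ = PySem.Str.join "" _
  congr 1
  rw [pvLoop_eq_walk]
  rfl
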